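-- pv_equiv track=rewrite | github.com/seapagan/aoc-2024 | 02/main.py | dampened_is_safe
-- ===== SOURCE A (Python) =====
-- def is_safe(report: list[int]) -> bool:
--     """Returns True if a report is safe.
--
--     A report is safe if:
--     - The levels are either all increasing or all decreasing.
--     - Any two adjacent levels differ by at least one and at most three.
--     """
--     if len(report) < 2:
--         return True  # A single-element report is inherently safe
--
--     last_direction = None
--     for index in range(len(report) - 1):
--         difference = report[index + 1] - report[index]
--         if not (1 <= abs(difference) <= 3):
--             return False  # not a safe report
--         direction = 1 if difference > 0 else -1
--
--         if last_direction is not None and direction != last_direction: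
--             return False
--
--         last_direction = direction
--
--     return True
--
-- def dampened_is_safe(report: list[int]) -> bool:
--     """Returns True if a report is safe.
--
--     We have more information!
--
--     A report is safe if:
--     - The levels are either all increasing or all decreasing.
--     - Any two adjacent levels differ by at least one and at most three.
--     - Using the 'problem dampener', we can remove ONE level from each report
--     """
--     if is_safe(report):
--         return True
--
--     # remove one level each time and test again:
--     for i in range(len(report)):
--         dampened_report = report[:i] + report[i + 1 :]
--         if is_safe(dampened_report):
--             return True
--
--     return False  # meh we tried!
-- ===== SOURCE B (Python) =====
-- def dampened_is_safe(report: list[int]) -> bool: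
--     """Single scan per direction: at the first bad adjacent pair only removing
--     one of its two endpoints can help, so test just those two candidates."""
--
--     def tol(xs, ok):
--         n = len(xs)
--         for i in range(n - 1):
--             if not ok(xs[i], xs[i + 1]):
--                 drop_left = (i == 0 or ok(xs[i - 1], xs[i + 1])) and all(
--                     ok(xs[k], xs[k + 1]) for k in range(i + 1, n - 1)
--                 )
--                 drop_right = (i + 2 >= n or ok(xs[i], xs[i + 2])) and all(
--                     ok(xs[k], xs[k + 1]) for k in range(i + 2, n - 1)
--                 )
--                 return drop_left or drop_right
--         return True
--
--     up = lambda a, b: 1 <= b - a <= 3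
--     down = lambda a, b: 1 <= a - b <= 3
--     return tol(report, up) or tol(report, down)
-- ===== Notes on version B (the rewrite author's own statement) =====
-- stated objective: faster
-- what changed: Instead of retesting the whole report with every element removed, B scans once per direction (increasing/decreasing) and at the first bad adjacent pair tests only the two candidate removals (its endpoints), since removing any other element leaves that bad pair adjacent.
import Mathlib
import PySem

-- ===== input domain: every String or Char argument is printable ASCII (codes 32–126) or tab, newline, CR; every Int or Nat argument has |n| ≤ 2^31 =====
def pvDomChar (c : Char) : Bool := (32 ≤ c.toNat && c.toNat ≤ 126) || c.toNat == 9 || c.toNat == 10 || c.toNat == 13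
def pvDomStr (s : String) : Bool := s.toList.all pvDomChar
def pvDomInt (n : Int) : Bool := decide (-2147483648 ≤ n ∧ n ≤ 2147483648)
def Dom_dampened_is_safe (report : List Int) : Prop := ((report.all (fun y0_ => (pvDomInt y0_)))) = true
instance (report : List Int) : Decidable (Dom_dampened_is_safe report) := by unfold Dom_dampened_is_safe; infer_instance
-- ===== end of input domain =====

-- B replaces A's try-every-removal O(n^2) loop by one scan per direction that
-- tests only the two removal candidates at the first bad pair (O(n)).

-- ===== PORT A =====
-- is_safe's index loop, carried as recursion over adjacent pairs with the
-- same state (last_direction : Option Int, previous element).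
def pvIsSafeAux (last : Option Int) (prev : Int) : List Int → Bool
  | [] => true
  | x :: rest =>
      let diff := x - prev
      if ¬ (1 ≤ |diff| ∧ |diff| ≤ 3) then false
      else
        let dir : Int := if diff > 0 then 1 else -1
        if last ≠ none ∧ last ≠ some dir then false
        else pvIsSafeAux (some dir) x rest

def pvIsSafe (report : List Int) : Bool :=
  if report.length < 2 then true
  else
    match report with
    | [] => true
    | a :: rest => pvIsSafeAux none a rest

-- report[:i] + report[i+1:] for 0 ≤ i < len is exactly take i ++ drop (i+1)
def dampened_is_safe (report : List Int) : Bool :=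
  if pvIsSafe report then true
  else (List.range report.length).any fun i =>
    pvIsSafe (report.take i ++ report.drop (i + 1))

-- ===== PORT B =====
def pvOkUp (a b : Int) : Bool := decide (1 ≤ b - a ∧ b - a ≤ 3)
def pvOkDn (a b : Int) : Bool := decide (1 ≤ a - b ∧ a - b ≤ 3)

-- the all(... for k in range(i+1, n-1)) tail checks
def pvStric (ok : Int → Int → Bool) : List Int → Bool
  | a :: b :: r => ok a b && pvStric ok (b :: r)
  | _ => true

-- the scan after the first pair, carrying the previous element p
def pvTolGo (ok : Int → Int → Bool) (p a : Int) : List Int → Bool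
  | [] => true
  | b :: r =>
      if ok a b then pvTolGo ok a b r
      else (ok p b && pvStric ok (b :: r)) || pvStric ok (a :: r)

def pvTol (ok : Int → Int → Bool) : List Int → Bool
  | a :: b :: r =>
      if ok a b then pvTolGo ok a b r
      else pvStric ok (b :: r) || pvStric ok (a :: r)
  | _ => true

def dampened_is_safe_alt (report : List Int) : Bool :=
  pvTol pvOkUp report || pvTol pvOkDn report

-- ===== PRECONDITION & SPEC =====
def Spec_dampened_is_safe (report : List Int) (out : Bool) : Prop := out = dampened_is_safe_alt report
instance (report : List Int) (out : Bool) : Decidable (Spec_dampened_is_safe report out) := by unfold Spec_dampened_is_safe; infer_instance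

-- ===== CLAIM (what is proved, stated in full; the proofs are below) =====
def Claim_equal_dampened_is_safe : Prop := ∀ (report : List Int), Dom_dampened_is_safe report → Spec_dampened_is_safe report (dampened_is_safe report)

-- ===== LEMMAS AND PROOFS =====

-- P l := pvStric ok l = true
-- invariant for pvTolGo: given ok p a, it decides "tail strict, or strict after
-- removing one element of a::r (in context p)"
theorem pvTolGo_iff (ok : Int → Int → Bool) :
    ∀ (r : List Int) (p a : Int), ok p a = true →
      (pvTolGo ok p a r = true ↔
        pvStric ok (a :: r) = true ∨ ∃ j, pvStric ok (p :: (a :: r).eraseIdx j) = true) := by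
  intro r
  induction r with
  | nil =>
      intro p a hpa
      simp [pvTolGo, pvStric]
  | cons b r ih =>
      intro p a hpa
      by_cases hab : ok a b = true
      · rw [show pvTolGo ok p a (b :: r) = pvTolGo ok a b r from by simp [pvTolGo, hab]]
        rw [ih a b hab]
        constructor
        · rintro (h | ⟨j, hj⟩)
          · exact Or.inl (by simp [pvStric, hab, h])
          · exact Or.inr ⟨j + 1, by simpa [List.eraseIdx, pvStric, hpa] using hj⟩
        · rintro (h | ⟨j, hj⟩)
          · exact Or.inl (by simpa [pvStric, hab] using h)
          · match j with
            | 0 =>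
                simp [List.eraseIdx, pvStric] at hj
                exact Or.inl hj.2
            | j + 1 =>
                simp [List.eraseIdx, pvStric] at hj
                exact Or.inr ⟨j, by simp [hj]⟩
      · rw [show pvTolGo ok p a (b :: r)
              = ((ok p b && pvStric ok (b :: r)) || pvStric ok (a :: r)) from by
            simp [pvTolGo, hab]]
        constructor
        · intro h
          rcases Bool.or_eq_true_iff.mp h with h | h
          · rcases Bool.and_eq_true_iff.mp h with ⟨h1, h2⟩
            exact Or.inr ⟨0, by simp [List.eraseIdx, pvStric, h1, h2] ⟩
          · exact Or.inr ⟨1, by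
              match r with
              | [] => simp [List.eraseIdx, pvStric, hpa] at h ⊢
              | c :: r' =>
                  simp [pvStric] at h
                  simp [List.eraseIdx, pvStric, hpa, h]⟩
        · rintro (h | ⟨j, hj⟩)
          · simp [pvStric, hab] at h
          · match j with
            | 0 =>
                simp [List.eraseIdx, pvStric] at hj
                simp [hj]
            | 1 =>
                simp [List.eraseIdx, pvStric, hpa] at hj
                simp [hj]
            | j + 2 =>
                simp [List.eraseIdx, pvStric, hab] at hj

-- pvTol decides: strict, or strict after removing some single element
theorem pvTol_iff (ok : Int → Int → Bool) (l : List Int) :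
    pvTol ok l = true ↔
      pvStric ok l = true ∨ ∃ j, pvStric ok (l.eraseIdx j) = true := by
  match l with
  | [] => simp [pvTol, pvStric, List.eraseIdx]
  | [a] =>
      simp [pvTol, pvStric]
  | a :: b :: r =>
      by_cases hab : ok a b = true
      · rw [show pvTol ok (a :: b :: r) = pvTolGo ok a b r from by simp [pvTol, hab]]
        rw [pvTolGo_iff ok r a b hab]
        constructor
        · rintro (h | ⟨j, hj⟩)
          · exact Or.inl (by simp [pvStric, hab, h])
          · exact Or.inr ⟨j + 1, by simpa [List.eraseIdx] using hj⟩
        · rintro (h | ⟨j, hj⟩)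
          · exact Or.inl (by simpa [pvStric, hab] using h)
          · match j with
            | 0 =>
                simp [List.eraseIdx] at hj
                exact Or.inl hj
            | j + 1 =>
                simp [List.eraseIdx] at hj
                exact Or.inr ⟨j, hj⟩
      · rw [show pvTol ok (a :: b :: r)
              = (pvStric ok (b :: r) || pvStric ok (a :: r)) from by simp [pvTol, hab]]
        constructor
        · intro h
          rcases Bool.or_eq_true_iff.mp h with h | h
          · exact Or.inr ⟨0, by simpa [List.eraseIdx] using h⟩
          · exact Or.inr ⟨1, by simpa [List.eraseIdx] using h⟩
        · rintro (h | ⟨j, hj⟩)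
          · simp [pvStric, hab] at h
          · match j with
            | 0 =>
                simp [List.eraseIdx] at hj
                simp [hj]
            | 1 =>
                simp [List.eraseIdx] at hj
                simp [hj]
            | j + 2 =>
                simp [List.eraseIdx, pvStric, hab] at hj

theorem pvAbsBounds (d : Int) : (1 ≤ |d| ∧ |d| ≤ 3) ↔ ((1 ≤ d ∧ d ≤ 3) ∨ (1 ≤ -d ∧ -d ≤ 3)) := by
  rcases abs_cases d with ⟨e, _⟩ | ⟨e, _⟩ <;> rw [e] <;> omega

theorem pvIsSafeAux_some_up (r : List Int) : ∀ p,
    pvIsSafeAux (some 1) p r = pvStric pvOkUp (p :: r) := by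
  induction r with
  | nil => intro p; simp [pvIsSafeAux, pvStric]
  | cons x rest ih =>
      intro p
      by_cases h : pvOkUp p x = true
      · have h' : 1 ≤ x - p ∧ x - p ≤ 3 := by simpa [pvOkUp] using h
        have hb : 1 ≤ |x - p| ∧ |x - p| ≤ 3 := (pvAbsBounds _).mpr (Or.inl h')
        have hpos : x - p > 0 := by omega
        have hlt : p < x := by omega
        simp [pvIsSafeAux, pvStric, h, hb.1, hb.2, hlt, ih]
      · have h' : ¬ (1 ≤ x - p ∧ x - p ≤ 3) := by simpa [pvOkUp] using h
        by_cases hb : 1 ≤ |x - p| ∧ |x - p| ≤ 3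
        · have hneg : ¬ (x - p > 0) := by
            rcases (pvAbsBounds _).mp hb with h2 | h2 <;> omega
          have hlt : ¬ p < x := by omega
          simp [pvIsSafeAux, pvStric, hb.1, hb.2, hlt, h]
        · have hb' : ¬ (1 ≤ |x - p| ∧ |x - p| ≤ 3) := hb
          simp [pvIsSafeAux, pvStric, hb', h]

theorem pvIsSafeAux_some_dn (r : List Int) : ∀ p,
    pvIsSafeAux (some (-1)) p r = pvStric pvOkDn (p :: r) := by
  induction r with
  | nil => intro p; simp [pvIsSafeAux, pvStric]
  | cons x rest ih =>
      intro p
      by_cases h : pvOkDn p x = true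
      · have h' : 1 ≤ p - x ∧ p - x ≤ 3 := by simpa [pvOkDn] using h
        have hb : 1 ≤ |x - p| ∧ |x - p| ≤ 3 := (pvAbsBounds _).mpr (Or.inr (by omega))
        have hneg : ¬ (x - p > 0) := by omega
        have hlt : ¬ p < x := by omega
        simp [pvIsSafeAux, pvStric, h, hb.1, hb.2, hlt, ih]
      · have h' : ¬ (1 ≤ p - x ∧ p - x ≤ 3) := by simpa [pvOkDn] using h
        by_cases hb : 1 ≤ |x - p| ∧ |x - p| ≤ 3
        · have hpos : x - p > 0 := by
            rcases (pvAbsBounds _).mp hb with h2 | h2 <;> omega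
          have hlt : p < x := by omega
          simp [pvIsSafeAux, pvStric, hb.1, hb.2, hlt, h]
        · have hb' : ¬ (1 ≤ |x - p| ∧ |x - p| ≤ 3) := hb
          simp [pvIsSafeAux, pvStric, hb', h]

theorem pvIsSafe_iff (l : List Int) :
    pvIsSafe l = true ↔ pvStric pvOkUp l = true ∨ pvStric pvOkDn l = true := by
  match l with
  | [] => simp [pvIsSafe, pvStric]
  | [a] => simp [pvIsSafe, pvStric]
  | a :: x :: rest =>
      rw [show pvIsSafe (a :: x :: rest) = pvIsSafeAux none a (x :: rest) from by
        simp [pvIsSafe]]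
      by_cases hb : 1 ≤ |x - a| ∧ |x - a| ≤ 3
      · rcases (pvAbsBounds _).mp hb with h2 | h2
        · have hlt : a < x := by omega
          rw [show pvIsSafeAux none a (x :: rest) = pvIsSafeAux (some 1) x rest from by
            simp [pvIsSafeAux, hb.1, hb.2, hlt]]
          rw [pvIsSafeAux_some_up]
          have hu : pvOkUp a x = true := by simp [pvOkUp]; omega
          have hd : pvOkDn a x = false := by simp [pvOkDn]; omega
          simp [pvStric, hu, hd]
        · have hlt : ¬ a < x := by omega
          rw [show pvIsSafeAux none a (x :: rest) = pvIsSafeAux (some (-1)) x rest from by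
            simp [pvIsSafeAux, hb.1, hb.2, hlt]]
          rw [pvIsSafeAux_some_dn]
          have hu : pvOkUp a x = false := by simp [pvOkUp]; omega
          have hd : pvOkDn a x = true := by simp [pvOkDn]; omega
          simp [pvStric, hu, hd]
      · have h1 : pvIsSafeAux none a (x :: rest) = false := by
          simp [pvIsSafeAux, hb]
        have hnb : ¬ ((1 ≤ x - a ∧ x - a ≤ 3) ∨ (1 ≤ -(x - a) ∧ -(x - a) ≤ 3)) :=
          fun hc => hb ((pvAbsBounds _).mpr hc)
        have hu : pvOkUp a x = false := by simp [pvOkUp]; omega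
        have hd : pvOkDn a x = false := by simp [pvOkDn]; omega
        simp [h1, pvStric, hu, hd]

theorem pvEraseIdx_of_le (l : List Int) (i : Nat) (h : l.length ≤ i) :
    l.eraseIdx i = l := List.eraseIdx_of_length_le h

theorem dampened_A_iff (l : List Int) :
    dampened_is_safe l = true ↔
      (pvStric pvOkUp l = true ∨ pvStric pvOkDn l = true) ∨
        ∃ j, pvStric pvOkUp (l.eraseIdx j) = true ∨ pvStric pvOkDn (l.eraseIdx j) = true := by
  unfold dampened_is_safe
  by_cases hs : pvIsSafe l = true
  · simp [hs, pvIsSafe_iff l |>.mp hs]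
  · simp [hs]
    constructor
    · rintro ⟨i, hi, h⟩
      refine Or.inr ⟨i, ?_⟩
      rw [List.eraseIdx_eq_take_drop_succ]
      exact (pvIsSafe_iff _).mp h
    · rintro (h | ⟨j, hj⟩)
      · exact absurd ((pvIsSafe_iff l).mpr h) hs
      · by_cases hjl : j < l.length
        · exact ⟨j, hjl,
            (pvIsSafe_iff _).mpr (by rwa [List.eraseIdx_eq_take_drop_succ] at hj)⟩
        · rw [pvEraseIdx_of_le l j (by omega)] at hj
          exact absurd ((pvIsSafe_iff l).mpr hj) hs

-- ===== VERDICT (by name: the statement is the Claim_ definition above) =====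
theorem dampened_is_safe_spec : Claim_equal_dampened_is_safe := by
  intro report _
  unfold Spec_dampened_is_safe
  have hA := dampened_A_iff report
  have hU := pvTol_iff pvOkUp report
  have hD := pvTol_iff pvOkDn report
  have hB : dampened_is_safe_alt report = true ↔
      (pvStric pvOkUp report = true ∨ pvStric pvOkDn report = true) ∨
        ∃ j, pvStric pvOkUp (report.eraseIdx j) = true ∨
          pvStric pvOkDn (report.eraseIdx j) = true := by
    unfold dampened_is_safe_alt
    rw [Bool.or_eq_true_iff, hU, hD]
    constructor
    · rintro ((h | ⟨j, hj⟩) | (h | ⟨j, hj⟩))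
      · exact Or.inl (Or.inl h)
      · exact Or.inr ⟨j, Or.inl hj⟩
      · exact Or.inl (Or.inr h)
      · exact Or.inr ⟨j, Or.inr hj⟩
    · rintro ((h | h) | ⟨j, hj | hj⟩)
      · exact Or.inl (Or.inl h)
      · exact Or.inr (Or.inl h)
      · exact Or.inl (Or.inr ⟨j, hj⟩)
      · exact Or.inr (Or.inr ⟨j, hj⟩)
  rw [← Bool.coe_iff_coe, hA, hB]
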